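-- pv_equiv track=rewrite | github.com/vaughnbetz/COFFE | coffe/tran_sizing.py | format_transistor_sizes_to_basic_subciruits
-- ===== SOURCE A (Python) =====
-- def format_transistor_sizes_to_basic_subciruits(transistor_sizes):
-- 	""" This takes a dictionary of transistor sizes and removes the _nmos and _pmos tags.
-- 		Also, inverters and transmission gates are given a single size. """
--
-- 	format_sizes = {}
-- 	for tran_name, size in transistor_sizes.items():
-- 		stripped_name = tran_name.replace("_nmos", "")
-- 		stripped_name = stripped_name.replace("_pmos", "")
-- 		if "inv_" in stripped_name or "tgate_" in stripped_name:
-- 			if stripped_name in list(format_sizes.keys()):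
-- 				if size < format_sizes[stripped_name]:
-- 					format_sizes[stripped_name] = size
-- 			else:
-- 				format_sizes[stripped_name] = size
-- 		else:
-- 			format_sizes[stripped_name] = size
--
-- 	return format_sizes
-- ===== SOURCE B (Python) =====
-- def format_transistor_sizes_to_basic_subciruits(transistor_sizes):
--     """ Two-pass reformulation: group all sizes per stripped name first,
--         then reduce each group (min for inv_/tgate_, last occurrence otherwise). """
--     groups = {}
--     for tran_name, size in transistor_sizes.items():
--         stripped_name = tran_name.replace("_nmos", "").replace("_pmos", "")
--         groups.setdefault(stripped_name, []).append(size)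
--     format_sizes = {}
--     for name, sizes in groups.items():
--         if "inv_" in name or "tgate_" in name:
--             format_sizes[name] = min(sizes)
--         else:
--             format_sizes[name] = sizes[-1]
--     return format_sizes
-- ===== Notes on version B (the rewrite author's own statement) =====
-- stated objective: alternative
-- what changed: A streams each item into the result dict, re-building the key list and comparing against the stored size inline; B first groups all sizes per stripped name in an insertion-ordered table, then reduces each group in a second pass (min for inv_/tgate_ names, last occurrence otherwise).
import Mathlib
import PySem

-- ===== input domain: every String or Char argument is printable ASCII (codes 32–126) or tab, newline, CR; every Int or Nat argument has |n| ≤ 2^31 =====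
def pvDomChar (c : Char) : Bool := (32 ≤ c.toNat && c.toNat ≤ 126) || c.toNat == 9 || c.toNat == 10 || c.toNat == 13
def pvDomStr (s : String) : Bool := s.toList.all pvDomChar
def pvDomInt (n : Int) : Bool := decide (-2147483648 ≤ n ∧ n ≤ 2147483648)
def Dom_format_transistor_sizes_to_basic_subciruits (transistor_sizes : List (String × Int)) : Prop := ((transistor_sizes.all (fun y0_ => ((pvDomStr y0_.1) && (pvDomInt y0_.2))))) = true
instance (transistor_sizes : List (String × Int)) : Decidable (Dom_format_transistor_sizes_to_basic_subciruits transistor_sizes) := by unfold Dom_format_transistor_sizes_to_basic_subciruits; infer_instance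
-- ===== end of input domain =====

-- B replaces A's single streaming merge by a group-by pass (all sizes per stripped name)
-- followed by a per-group reduction (min for inv_/tgate_, last occurrence otherwise);
-- objective: alternative decomposition, same results.

-- ===== PORT A =====
-- one loop iteration of A: strip the tags, then merge into the running dict
def aStep (d : PySem.Dict String Int) (p : String × Int) : PySem.Dict String Int :=
  let stripped_name := PySem.Str.replace p.1 "_nmos" ""
  let stripped_name2 := PySem.Str.replace stripped_name "_pmos" ""
  if PySem.Str.isIn "inv_" stripped_name2 || PySem.Str.isIn "tgate_" stripped_name2 then
    if (PySem.Dict.keys d).contains stripped_name2 then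
      -- the guard guarantees the key is present, so getD is exact for format_sizes[stripped_name]
      if p.2 < d.getD stripped_name2 0 then d.insert stripped_name2 p.2 else d
    else d.insert stripped_name2 p.2
  else d.insert stripped_name2 p.2

def format_transistor_sizes_to_basic_subciruits (transistor_sizes : List (String × Int)) : List (String × Int) :=
  (transistor_sizes.foldl aStep PySem.Dict.empty).items

-- ===== PORT B =====
def pvStrip (s : String) : String :=
  PySem.Str.replace (PySem.Str.replace s "_nmos" "") "_pmos" ""

-- groups.setdefault(stripped_name, []).append(size): append to the group list, key keeps its position
def bGroup (g : PySem.Dict String (List Int)) (p : String × Int) : PySem.Dict String (List Int) :=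
  g.insert (pvStrip p.1) (g.getD (pvStrip p.1) [] ++ [p.2])

-- min(sizes) / sizes[-1]; group lists are nonempty by construction, so the getD 0 default never fires
def bReduce (name : String) (sizes : List Int) : Int :=
  if PySem.Str.isIn "inv_" name || PySem.Str.isIn "tgate_" name then
    (PySem.List.min? sizes (fun x => x)).getD 0
  else (PySem.List.pyGet? sizes (-1)).getD 0

def format_transistor_sizes_to_basic_subciruits_alt (transistor_sizes : List (String × Int)) : List (String × Int) :=
  let groups := transistor_sizes.foldl bGroup PySem.Dict.empty
  (groups.items.foldl (fun r p => r.insert p.1 (bReduce p.1 p.2)) PySem.Dict.empty).items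

-- ===== PRECONDITION & SPEC =====
def Spec_format_transistor_sizes_to_basic_subciruits (transistor_sizes : List (String × Int)) (out : List (String × Int)) : Prop := out = format_transistor_sizes_to_basic_subciruits_alt transistor_sizes
instance (transistor_sizes : List (String × Int)) (out : List (String × Int)) : Decidable (Spec_format_transistor_sizes_to_basic_subciruits transistor_sizes out) := by unfold Spec_format_transistor_sizes_to_basic_subciruits; infer_instance

-- ===== CLAIM (what is proved, stated in full; the proofs are below) =====
def Claim_equal_format_transistor_sizes_to_basic_subciruits : Prop := ∀ (transistor_sizes : List (String × Int)), Dom_format_transistor_sizes_to_basic_subciruits transistor_sizes → Spec_format_transistor_sizes_to_basic_subciruits transistor_sizes (format_transistor_sizes_to_basic_subciruits transistor_sizes)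

-- ===== LEMMAS AND PROOFS =====

-- the reduced dict corresponding to a group dict
def finalize (g : PySem.Dict String (List Int)) : PySem.Dict String Int :=
  PySem.Dict.mk (g.items.map (fun p => (p.1, bReduce p.1 p.2)))

lemma keys_finalize (g : PySem.Dict String (List Int)) : (finalize g).keys = g.keys := by
  simp [finalize, PySem.Dict.keys]

lemma contains_finalize (g : PySem.Dict String (List Int)) (s : String) :
    (finalize g).contains s = g.contains s := by
  rw [PySem.Dict.contains_eq_decide_mem_keys, PySem.Dict.contains_eq_decide_mem_keys, keys_finalize]

lemma bReduce_singleton (s : String) (v : Int) : bReduce s [v] = v := by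
  unfold bReduce
  split <;> simp [PySem.List.min?, PySem.List.pyGet?, PySem.List.pyIdx?]

lemma min_getD_append (l : List Int) (hl : l ≠ []) (v : Int) :
    (PySem.List.min? (l ++ [v]) (fun x => x)).getD 0
      = min ((PySem.List.min? l (fun x => x)).getD 0) v := by
  obtain ⟨x, t, rfl⟩ := List.exists_cons_of_ne_nil hl
  rw [List.cons_append, PySem.List.min?_id_cons, PySem.List.min?_id_cons]
  simp [List.foldl_append]

lemma last_getD_append (l : List Int) (v : Int) :
    (PySem.List.pyGet? (l ++ [v]) (-1)).getD 0 = v := by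
  have h1 : PySem.List.pyIdx? (l.length + 1) (-1) = some l.length := by
    unfold PySem.List.pyIdx?
    rw [if_neg (by omega), if_pos (by push_cast; omega)]
    norm_num
  simp [PySem.List.pyGet?, h1]

lemma bReduce_append (s : String) (l : List Int) (hl : l ≠ []) (v : Int) :
    bReduce s (l ++ [v])
      = if PySem.Str.isIn "inv_" s || PySem.Str.isIn "tgate_" s then min (bReduce s l) v else v := by
  by_cases h : (PySem.Str.isIn "inv_" s || PySem.Str.isIn "tgate_" s) = true
  · simp only [bReduce, h, if_true]
    exact min_getD_append l hl v
  · simp only [bReduce, Bool.not_eq_true] at *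
    simp only [h, Bool.false_eq_true, if_false]
    exact last_getD_append l v

-- inserting the reduction of the new group list commutes with finalize (key already present)
lemma insert_finalize (g : PySem.Dict String (List Int)) (s : String) (l' : List Int)
    (hc : g.contains s = true) :
    (finalize g).insert s (bReduce s l') = finalize (g.insert s l') := by
  have hc' : (finalize g).contains s = true := by rw [contains_finalize]; exact hc
  apply PySem.Dict.ext
  show ((finalize g).insert s (bReduce s l')).items = (g.insert s l').items.map _
  rw [PySem.Dict.items_insert_of_contains _ _ hc', PySem.Dict.items_insert_of_contains _ _ hc]
  show (g.items.map _).map _ = _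
  rw [List.map_map, List.map_map]
  apply List.map_congr_left
  intro p _
  by_cases h : p.1 = s <;> simp [Function.comp, h]

-- same, fresh key: both sides append
lemma insert_finalize_fresh (g : PySem.Dict String (List Int)) (s : String) (l' : List Int)
    (hc : g.contains s = false) :
    (finalize g).insert s (bReduce s l') = finalize (g.insert s l') := by
  have hc' : (finalize g).contains s = false := by rw [contains_finalize]; exact hc
  apply PySem.Dict.ext
  show ((finalize g).insert s (bReduce s l')).items = (g.insert s l').items.map _
  rw [PySem.Dict.items_insert_of_not_contains _ _ hc', PySem.Dict.items_insert_of_not_contains _ _ hc]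
  simp [finalize]

-- re-inserting the value already stored is the identity
lemma insert_get?_self (d : PySem.Dict String Int) (k : String) (w : Int)
    (hnd : d.keys.Nodup) (h : d.get? k = some w) : d.insert k w = d := by
  have hc : d.contains k = true := by
    cases hcb : d.contains k
    · rw [← PySem.Dict.get?_eq_none_iff_contains] at hcb; rw [hcb] at h; cases h
    · rfl
  apply PySem.Dict.ext
  rw [PySem.Dict.items_insert_of_contains _ _ hc]
  conv_rhs => rw [← List.map_id d.items]
  apply List.map_congr_left
  intro p hp
  by_cases hpk : p.1 = k
  · have hp' : (p.1, p.2) ∈ d.items := by simpa using hp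
    have := PySem.Dict.get?_of_mem_items d hp' hnd
    rw [hpk, h] at this
    have hv : w = p.2 := by injection this
    rw [if_pos (by simp [hpk]), hv, ← hpk]
    simp
  · simp [hpk]

lemma step_eq (g : PySem.Dict String (List Int)) (hnd : g.keys.Nodup)
    (hne : ∀ p ∈ g.items, p.2 ≠ []) (name : String) (v : Int) :
    aStep (finalize g) (name, v) = finalize (bGroup g (name, v)) := by
  have hfnd : (finalize g).keys.Nodup := by rw [keys_finalize]; exact hnd
  set s := PySem.Str.replace (PySem.Str.replace name "_nmos" "") "_pmos" "" with hsdef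
  have hBshape : bGroup g (name, v) = g.insert s (g.getD s [] ++ [v]) := rfl
  have hAshape : aStep (finalize g) (name, v)
      = (if PySem.Str.isIn "inv_" s || PySem.Str.isIn "tgate_" s then
          if ((finalize g).keys).contains s then
            if v < (finalize g).getD s 0 then (finalize g).insert s v else finalize g
          else (finalize g).insert s v
        else (finalize g).insert s v) := rfl
  rw [hAshape, hBshape]
  by_cases hc : g.contains s = true
  · obtain ⟨l, hl⟩ : ∃ l, g.get? s = some l := by
      cases h : g.get? s with
      | none => rw [PySem.Dict.get?_eq_none_iff_contains] at h; rw [h] at hc; cases hc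
      | some l => exact ⟨l, rfl⟩
    have hmem : (s, l) ∈ g.items := PySem.Dict.mem_items_of_get?_eq_some g hl
    have hlne : l ≠ [] := hne _ hmem
    have hgd : g.getD s [] = l := PySem.Dict.getD_of_get?_eq_some g [] hl
    have hfmem : (s, bReduce s l) ∈ (finalize g).items := by
      simp only [finalize]
      exact List.mem_map.2 ⟨(s, l), hmem, rfl⟩
    have hfgd : (finalize g).getD s 0 = bReduce s l :=
      PySem.Dict.getD_of_mem_items _ hfmem hfnd 0
    have hkc : ((finalize g).keys).contains s = true := by
      rw [List.contains_iff_mem, keys_finalize]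
      exact (PySem.Dict.contains_iff_mem_keys g s).1 hc
    rw [hgd, hkc, hfgd]
    by_cases hspec : (PySem.Str.isIn "inv_" s || PySem.Str.isIn "tgate_" s) = true
    · simp only [hspec, if_true]
      by_cases hlt : v < bReduce s l
      · simp only [if_pos hlt]
        have hval : bReduce s (l ++ [v]) = v := by
          rw [bReduce_append s l hlne v, if_pos hspec]
          exact min_eq_right (le_of_lt hlt)
        rw [← insert_finalize g s (l ++ [v]) hc, hval]
      · simp only [if_neg hlt]
        have hval : bReduce s (l ++ [v]) = bReduce s l := by
          rw [bReduce_append s l hlne v, if_pos hspec]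
          exact min_eq_left (not_lt.mp hlt)
        rw [← insert_finalize g s (l ++ [v]) hc, hval]
        rw [insert_get?_self (finalize g) s (bReduce s l) hfnd]
        exact PySem.Dict.get?_of_mem_items _ hfmem hfnd
    · simp only [Bool.not_eq_true] at hspec
      simp only [hspec, Bool.false_eq_true, if_false]
      have hval : bReduce s (l ++ [v]) = v := by
        rw [bReduce_append s l hlne v, if_neg (by rw [hspec]; exact Bool.false_ne_true)]
      rw [← insert_finalize g s (l ++ [v]) hc, hval]
  · simp only [Bool.not_eq_true] at hc
    have hgd : g.getD s [] = [] := PySem.Dict.getD_of_not_contains g [] hc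
    have hkc : ((finalize g).keys).contains s = false := by
      rw [keys_finalize]
      cases hm : (g.keys).contains s
      · rfl
      · rw [List.contains_iff_mem] at hm
        rw [← PySem.Dict.contains_iff_mem_keys] at hm
        rw [hm] at hc; cases hc
    have hgoal : (finalize g).insert s v = finalize (g.insert s ([] ++ [v])) := by
      have h := insert_finalize_fresh g s [v] hc
      rw [bReduce_singleton] at h
      exact h
    rw [hgd, hkc]
    by_cases hspec : (PySem.Str.isIn "inv_" s || PySem.Str.isIn "tgate_" s) = true
    · simp only [hspec, if_true, Bool.false_eq_true, if_false]
      exact hgoal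
    · simp only [Bool.not_eq_true] at hspec
      simp only [hspec, Bool.false_eq_true, if_false]
      exact hgoal

lemma values_bGroup (g : PySem.Dict String (List Int)) (hne : ∀ p ∈ g.items, p.2 ≠ [])
    (x : String × Int) : ∀ p ∈ (bGroup g x).items, p.2 ≠ [] := by
  intro p hp
  unfold bGroup at hp
  rcases (PySem.Dict.mem_items_insert _ _ _ _).1 hp with h | h
  · subst h; simp
  · exact hne _ h.1

lemma main_inv (ts : List (String × Int)) (g : PySem.Dict String (List Int))
    (hnd : g.keys.Nodup) (hne : ∀ p ∈ g.items, p.2 ≠ []) :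
    ts.foldl aStep (finalize g) = finalize (ts.foldl bGroup g) := by
  induction ts generalizing g with
  | nil => rfl
  | cons x rest ih =>
      obtain ⟨name, v⟩ := x
      rw [List.foldl_cons, List.foldl_cons, step_eq g hnd hne name v]
      exact ih _ (PySem.Dict.nodup_keys_insert _ _ _ hnd) (values_bGroup g hne (name, v))

lemma foldl_bGroup_inv (ts : List (String × Int)) (g : PySem.Dict String (List Int))
    (hnd : g.keys.Nodup) (hne : ∀ p ∈ g.items, p.2 ≠ []) :
    (ts.foldl bGroup g).keys.Nodup ∧ ∀ p ∈ (ts.foldl bGroup g).items, p.2 ≠ [] := by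
  induction ts generalizing g with
  | nil => exact ⟨hnd, hne⟩
  | cons x rest ih =>
      exact ih _ (PySem.Dict.nodup_keys_insert _ _ _ hnd) (values_bGroup g hne x)

-- ===== VERDICT (by name: the statement is the Claim_ definition above) =====
theorem format_transistor_sizes_to_basic_subciruits_spec : Claim_equal_format_transistor_sizes_to_basic_subciruits := by
  intro ts _
  show (ts.foldl aStep PySem.Dict.empty).items
      = ((ts.foldl bGroup PySem.Dict.empty).items.foldl
          (fun r p => r.insert p.1 (bReduce p.1 p.2)) PySem.Dict.empty).items
  have hempty : ∀ p ∈ (PySem.Dict.empty : PySem.Dict String (List Int)).items, p.2 ≠ [] := by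
    intro p hp; cases hp
  obtain ⟨hnd, hne⟩ := foldl_bGroup_inv ts PySem.Dict.empty PySem.Dict.nodup_keys_empty hempty
  rw [PySem.Dict.items_foldl_insert_fresh (ts.foldl bGroup PySem.Dict.empty).items
    (fun a => a.1) (fun a => bReduce a.1 a.2) PySem.Dict.empty
    (fun a _ => PySem.Dict.contains_empty a.1) hnd]
  have := main_inv ts PySem.Dict.empty PySem.Dict.nodup_keys_empty hempty
  rw [show finalize PySem.Dict.empty = PySem.Dict.empty from rfl] at this
  rw [this]
  rfl
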